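-- pv_equiv track=rewrite | github.com/Reezl/Arvore-IPv4 | Arvore Ipv4/arvore_IPV4.py | genMask
-- ===== SOURCE A (Python) =====
-- def genMask(mask):
-- 	m = []
-- 	c = 0
-- 	for i in range(32):
-- 		if i == 0:
-- 			m.append([])
-- 		elif i % 8 == 0:
-- 			m.append([])
-- 			c += 1
-- 		if i <= mask:
-- 			m[c].append(1)
-- 		else:
-- 			m[c].append(0)
-- 	return m
-- ===== SOURCE B (Python) =====
-- def genMask(mask):
--     bits = [1 if i <= mask else 0 for i in range(32)]
--     return [bits[j:j+8] for j in range(0, 32, 8)]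
-- ===== Notes on version B (the rewrite author's own statement) =====
-- stated objective: simpler
-- what changed: Replaces the single interleaved loop that tracks an octet index and mutates the last sublist with a two-phase build: first compute the flat list of all bits, then chunk it into octets by slicing.
import Mathlib
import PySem

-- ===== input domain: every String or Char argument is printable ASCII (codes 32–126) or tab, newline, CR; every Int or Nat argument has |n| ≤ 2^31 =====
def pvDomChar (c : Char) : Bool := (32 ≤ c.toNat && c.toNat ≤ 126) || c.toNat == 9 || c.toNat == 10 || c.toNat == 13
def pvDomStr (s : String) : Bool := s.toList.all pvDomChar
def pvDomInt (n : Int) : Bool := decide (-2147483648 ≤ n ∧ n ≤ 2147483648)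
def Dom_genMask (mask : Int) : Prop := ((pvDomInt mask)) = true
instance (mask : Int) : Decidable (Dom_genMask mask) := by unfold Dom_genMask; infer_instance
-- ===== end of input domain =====

-- B replaces A's interleaved loop (octet index c, mutation of the last sublist) by a
-- two-phase build: flat 32-bit list first, then chunked into four octets by slicing (simpler).


-- ===== PORT A =====
-- one iteration of A's loop body; state = (m, c); c is always a valid nonneg index into m
def genMaskStep (mask : Int) (st : List (List Int) × Nat) (i : Int) : List (List Int) × Nat :=
  let m := st.1
  let c := st.2
  let mc : List (List Int) × Nat :=
    if i = 0 then (m ++ [([] : List Int)], c)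
    else if PySem.Int.mod i 8 = 0 then (m ++ [([] : List Int)], c + 1)
    else (m, c)
  let m' := mc.1
  let c' := mc.2
  let m'' := if i ≤ mask then m'.modify c' (fun l => l ++ [(1 : Int)])
             else m'.modify c' (fun l => l ++ [(0 : Int)])
  (m'', c')

def genMask (mask : Int) : List (List Int) :=
  ((PySem.List.pyRange 0 32 1).foldl (genMaskStep mask) ([], 0)).1

-- ===== PORT B =====
def genMask_alt (mask : Int) : List (List Int) :=
  let bits : List Int := (PySem.List.pyRange 0 32 1).map (fun i => if i ≤ mask then 1 else 0)
  (PySem.List.pyRange 0 32 8).map (fun j => PySem.List.slice bits (some j) (some (j + 8)))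

-- ===== PRECONDITION & SPEC =====
def Spec_genMask (mask : Int) (out : List (List Int)) : Prop := out = genMask_alt mask
instance (mask : Int) (out : List (List Int)) : Decidable (Spec_genMask mask out) := by unfold Spec_genMask; infer_instance

-- ===== CLAIM (what is proved, stated in full; the proofs are below) =====
def Claim_equal_genMask : Prop := ∀ (mask : Int), Dom_genMask mask → Spec_genMask mask (genMask mask)

-- ===== LEMMAS AND PROOFS =====
-- both programs read mask only through 'i ≤ mask' for i ∈ [0,31]; clamp mask into [-1,31]
def pvClamp (mask : Int) : Int := if mask < 0 then -1 else if 31 < mask then 31 else mask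

theorem pvClamp_le_iff (mask i : Int) (h0 : 0 ≤ i) (h31 : i < 32) :
    (i ≤ mask) ↔ (i ≤ pvClamp mask) := by
  unfold pvClamp; split_ifs <;> omega

theorem genMask_clamp (mask : Int) : genMask mask = genMask (pvClamp mask) := by
  unfold genMask
  rw [PySem.List.foldl_congr_mem' (g := genMaskStep (pvClamp mask))]
  intro i hi st
  rw [PySem.List.mem_pyRange_one] at hi
  unfold genMaskStep
  simp only [pvClamp_le_iff mask i hi.1 hi.2]

theorem genMask_alt_clamp (mask : Int) : genMask_alt mask = genMask_alt (pvClamp mask) := by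
  unfold genMask_alt
  have hbits : (PySem.List.pyRange 0 32 1).map (fun i => if i ≤ mask then (1 : Int) else 0)
      = (PySem.List.pyRange 0 32 1).map (fun i => if i ≤ pvClamp mask then (1 : Int) else 0) := by
    apply List.map_congr_left
    intro i hi
    rw [PySem.List.mem_pyRange_one] at hi
    simp only [pvClamp_le_iff mask i hi.1 hi.2]
  simp only [hbits]

theorem genMask_eq_alt_clamped (k : Int) (h1 : -1 ≤ k) (h2 : k ≤ 31) :
    genMask k = genMask_alt k := by
  interval_cases k <;> decide

-- ===== VERDICT (by name: the statement is the Claim_ definition above) =====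
theorem genMask_spec : Claim_equal_genMask := by
  intro mask _
  unfold Spec_genMask
  rw [genMask_clamp, genMask_alt_clamp]
  apply genMask_eq_alt_clamped
  · unfold pvClamp; split_ifs <;> omega
  · unfold pvClamp; split_ifs <;> omega
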